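-- pv_equiv track=rewrite | github.com/OlaszPL/Algorithms_and_data_structures_course | Egzamin_3 2024/egz3a/egz3a.py | mykoryza
-- ===== SOURCE A (Python) =====
-- from collections import deque
-- from math import inf
--
-- def modded_bfs(G, T, n):
--     time = [inf] * n
--     mark = [None] * n
--     idx = {}
--     Q = deque()
--
--     for i in range(len(T)):
--         u = T[i]
--         Q.append(u)
--         time[u] = 0
--         mark[u] = u
--         idx[u] = i
--
--     while len(Q) > 0:
--         u = Q.popleft()
--         t = time[u] + 1
--         for v in G[u]:
--             if time[v] > t:
--                 time[v] = t
--                 mark[v] = mark[u]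
--                 Q.append(v)
--             elif time[v] == t and idx[mark[v]] > idx[mark[u]]:
--                 mark[v] = mark[u]
--                 Q.append(v)
--
--     return mark
--
-- def mykoryza( G,T,d ):
--     n = len(G)
--     mark = modded_bfs(G, T, n)
--     cnt = 0
--     u = T[d]
--
--     for m in mark:
--         if m == u:
--             cnt += 1
--
--     return cnt
-- ===== SOURCE B (Python) =====
-- from math import inf
--
-- def mykoryza(G, T, d):
--     # Iterative relaxation (Bellman-Ford style): sweep every reached node's
--     # out-edges with the lexicographic key (distance, source index) until no
--     # sweep changes anything, instead of A's FIFO label-correcting queue.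
--     n = len(G)
--     time = [inf] * n
--     mark = [None] * n
--     idx = {}
--     for i in range(len(T)):
--         u = T[i]
--         time[u] = 0
--         mark[u] = u
--         idx[u] = i
--
--     changed = True
--     while changed:
--         changed = False
--         for u in range(n):
--             if mark[u] is None:
--                 continue
--             t = time[u] + 1
--             for v in G[u]:
--                 if time[v] > t or (time[v] == t and idx[mark[v]] > idx[mark[u]]):
--                     time[v] = t
--                     mark[v] = mark[u]
--                     changed = True
--
--     target = T[d]
--     return sum(1 for m in mark if m == target)
-- ===== Notes on version B (the rewrite author's own statement) =====
-- stated objective: alternative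
-- what changed: A's FIFO label-correcting BFS (deque worklist, nodes re-enqueued whenever their (distance, source-index) label improves) is replaced by global Bellman-Ford-style relaxation sweeps over all reached nodes, repeated until a full sweep changes nothing; the queue disappears entirely.
-- outside the precondition, e.g. on mykoryza([[5], []], [1], 0): A returns 1, B returns 1
import Mathlib
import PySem

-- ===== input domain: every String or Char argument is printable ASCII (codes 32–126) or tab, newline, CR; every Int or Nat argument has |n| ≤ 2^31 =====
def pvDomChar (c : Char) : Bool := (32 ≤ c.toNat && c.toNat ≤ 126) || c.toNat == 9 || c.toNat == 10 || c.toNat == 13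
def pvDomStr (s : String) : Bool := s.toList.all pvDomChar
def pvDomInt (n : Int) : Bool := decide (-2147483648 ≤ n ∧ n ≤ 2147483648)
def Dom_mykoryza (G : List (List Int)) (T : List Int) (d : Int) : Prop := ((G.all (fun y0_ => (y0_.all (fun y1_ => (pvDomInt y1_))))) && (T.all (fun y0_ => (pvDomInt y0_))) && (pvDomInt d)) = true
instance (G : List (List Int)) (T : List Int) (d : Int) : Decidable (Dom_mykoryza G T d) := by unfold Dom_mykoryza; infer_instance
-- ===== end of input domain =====

-- B replaces A's FIFO label-correcting BFS by global relaxation sweeps run to a fixed point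
-- (same results; no speed claim).

-- ===== PORT A =====
-- time cells are Option Int: none is math.inf; 'inf > t' is true, 'inf == t' is false.
def aGt (tv : Option Int) (t : Int) : Bool :=
  match tv with
  | none => true
  | some x => decide (t < x)

def aEq (tv : Option Int) (t : Int) : Bool :=
  match tv with
  | none => false
  | some x => decide (x = t)

-- body of 'for v in G[u]': the two-branch if/elif of A (idx[...] via getD: under Pre_
-- the keys are always present, exactly as in the Python run).
def aRelax (idx : PySem.Dict Int Int) (u : Int) (t : Int)
    (s : List (Option Int) × List (Option Int) × List Int) (v : Int) :
    List (Option Int) × List (Option Int) × List Int :=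
  let tv := PySem.List.pyGetD s.1 v none
  if aGt tv t then
    (PySem.List.pySetD s.1 v (some t),
     PySem.List.pySetD s.2.1 v (PySem.List.pyGetD s.2.1 u none),
     s.2.2 ++ [v])
  else if aEq tv t && decide (idx.getD ((PySem.List.pyGetD s.2.1 u none).getD 0) 0 <
      idx.getD ((PySem.List.pyGetD s.2.1 v none).getD 0) 0) then
    (s.1,
     PySem.List.pySetD s.2.1 v (PySem.List.pyGetD s.2.1 u none),
     s.2.2 ++ [v])
  else s

-- 'while len(Q) > 0': fueled (the fuel passed by mykoryza is proved sufficient below).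
def aLoop (G : List (List Int)) (idx : PySem.Dict Int Int) :
    Nat → List (Option Int) × List (Option Int) × List Int →
    List (Option Int) × List (Option Int)
  | 0, s => (s.1, s.2.1)
  | fuel+1, s =>
    match s.2.2 with
    | [] => (s.1, s.2.1)
    | u :: Q' =>
      let t := (PySem.List.pyGetD s.1 u none).getD 0 + 1
      aLoop G idx fuel ((PySem.List.pyGetD G u []).foldl (aRelax idx u t) (s.1, s.2.1, Q'))

def mykoryza (G : List (List Int)) (T : List Int) (d : Int) : Int :=
  let n := G.length
  let init := (PySem.List.pyRange 0 (PySem.List.len T) 1).foldl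
    (fun st i =>
      let u := PySem.List.pyGetD T i 0
      (PySem.List.pySetD st.1 u (some (0:Int)),
       PySem.List.pySetD st.2.1 u (some u),
       st.2.2.1.insert u i,
       st.2.2.2 ++ [u]))
    ((List.replicate n (none : Option Int)), (List.replicate n (none : Option Int)),
     (PySem.Dict.empty : PySem.Dict Int Int), ([] : List Int))
  let res := aLoop G init.2.2.1 (n*(n+1)*T.length + T.length + 1) (init.1, init.2.1, init.2.2.2)
  let u := PySem.List.pyGetD T d 0
  res.2.foldl (fun cnt m => if m == some u then cnt + 1 else cnt) 0

-- ===== PORT B =====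
-- the single or-condition of B's relaxation
def bCond (idx : PySem.Dict Int Int) (tv : Option Int) (t : Int) (mv mu : Option Int) : Bool :=
  match tv with
  | none => true
  | some x => decide (t < x) ||
      (decide (x = t) && decide (idx.getD (mu.getD 0) 0 < idx.getD (mv.getD 0) 0))

-- body of 'for v in G[u]' in a sweep (state carries the 'changed' flag)
def bRelax (idx : PySem.Dict Int Int) (u : Int) (t : Int)
    (s : List (Option Int) × List (Option Int) × Bool) (v : Int) :
    List (Option Int) × List (Option Int) × Bool :=
  if bCond idx (PySem.List.pyGetD s.1 v none) t
      (PySem.List.pyGetD s.2.1 v none) (PySem.List.pyGetD s.2.1 u none) then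
    (PySem.List.pySetD s.1 v (some t),
     PySem.List.pySetD s.2.1 v (PySem.List.pyGetD s.2.1 u none),
     true)
  else s

-- one sweep 'for u in range(n)' returning the state and whether anything changed
def bPass (G : List (List Int)) (idx : PySem.Dict Int Int) (n : Nat)
    (s : List (Option Int) × List (Option Int)) :
    (List (Option Int) × List (Option Int)) × Bool :=
  let r := (PySem.List.pyRange 0 (n : Int) 1).foldl
    (fun st u =>
      match PySem.List.pyGetD st.2.1 u none with
      | none => st
      | some _ =>
        let t := (PySem.List.pyGetD st.1 u none).getD 0 + 1
        (PySem.List.pyGetD G u []).foldl (bRelax idx u t) st)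
    (s.1, s.2, false)
  ((r.1, r.2.1), r.2.2)

-- 'while changed': fueled (the fuel passed by mykoryza_alt is proved sufficient below)
def bLoop (G : List (List Int)) (idx : PySem.Dict Int Int) (n : Nat) :
    Nat → List (Option Int) × List (Option Int) → List (Option Int) × List (Option Int)
  | 0, s => s
  | fuel+1, s =>
    let r := bPass G idx n s
    if r.2 then bLoop G idx n fuel r.1 else r.1

def mykoryza_alt (G : List (List Int)) (T : List Int) (d : Int) : Int :=
  let n := G.length
  let init := (PySem.List.pyRange 0 (PySem.List.len T) 1).foldl
    (fun st i =>
      let u := PySem.List.pyGetD T i 0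
      (PySem.List.pySetD st.1 u (some (0:Int)),
       PySem.List.pySetD st.2.1 u (some u),
       st.2.2.insert u i))
    ((List.replicate n (none : Option Int)), (List.replicate n (none : Option Int)),
     (PySem.Dict.empty : PySem.Dict Int Int))
  let res := bLoop G init.2.2 n (n*(n+1)*T.length + 1) (init.1, init.2.1)
  let target := PySem.List.pyGetD T d 0
  res.2.foldl (fun cnt m => cnt + (if m == some target then 1 else 0)) 0

-- ===== PRECONDITION & SPEC =====
-- Pre_ is the natural domain: a well-formed adjacency list (every entry a valid, possibly
-- negative, Python index), valid source indices and a valid position d. A raises outside it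
-- except that it happens to return when the only malformed rows belong to nodes it never
-- reaches; those accidental inputs are excluded with the rest of the malformed graphs.
def Pre_mykoryza (G : List (List Int)) (T : List Int) (d : Int) : Prop :=
  T ≠ [] ∧ PySem.Raise.InRange T.length d ∧
  (∀ u ∈ T, PySem.Raise.InRange G.length u) ∧
  (∀ row ∈ G, ∀ v ∈ row, PySem.Raise.InRange G.length v)
instance (G : List (List Int)) (T : List Int) (d : Int) : Decidable (Pre_mykoryza G T d) := by
  unfold Pre_mykoryza; infer_instance

def pvWitness_mykoryza : List (List Int) × List Int × Int := ([[1], [0], [-3]], [2, 0], -1)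

def Spec_mykoryza (G : List (List Int)) (T : List Int) (d : Int) (out : Int) : Prop := out = mykoryza_alt G T d
instance (G : List (List Int)) (T : List Int) (d : Int) (out : Int) : Decidable (Spec_mykoryza G T d out) := by unfold Spec_mykoryza; infer_instance

-- ===== CLAIM (what is proved, stated in full; the proofs are below) =====
def Claim_equal_mykoryza : Prop := ∀ (G : List (List Int)) (T : List Int) (d : Int), Dom_mykoryza G T d → Pre_mykoryza G T d → Spec_mykoryza G T d (mykoryza G T d)

-- ===== LEMMAS AND PROOFS =====

-- ---------- normalized Python index ----------
def pnorm (n : Nat) (i : Int) : Nat := if i < 0 then (n + i).toNat else i.toNat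

theorem pnorm_lt {n : Nat} {i : Int} (h : PySem.Raise.InRange n i) : pnorm n i < n := by
  unfold PySem.Raise.InRange at h
  unfold pnorm
  split <;> omega

theorem pyGetD_pnorm {α : Type} {xs : List α} {i : Int} (d : α)
    (h : PySem.Raise.InRange xs.length i) :
    PySem.List.pyGetD xs i d = xs.getD (pnorm xs.length i) d := by
  unfold PySem.Raise.InRange at h
  unfold pnorm
  simp only [PySem.List.pyGetD, PySem.List.pyGet?, PySem.List.pyIdx?]
  by_cases hi : i < 0
  · rw [if_neg (by omega : ¬ (0:Int) ≤ i), if_pos (by omega : -(xs.length:Int) ≤ i), if_pos hi]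
    simp only [Option.bind_some]
    rw [List.getD_eq_getElem?_getD, List.getElem?_eq_getElem (by omega), Option.getD_some]
    have : (↑xs.length + i).toNat = xs.length - (-i).toNat := by omega
    rw [this, List.getElem?_eq_getElem (by omega), Option.getD_some]
  · rw [if_pos (by omega : (0:Int) ≤ i), if_pos (by omega : i < (xs.length:Int)), if_neg hi]
    simp only [Option.bind_some]
    rw [List.getD_eq_getElem?_getD]

theorem pySetD_pnorm {α : Type} {xs : List α} {i : Int} (v : α)
    (h : PySem.Raise.InRange xs.length i) :
    PySem.List.pySetD xs i v = xs.set (pnorm xs.length i) v := by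
  unfold PySem.Raise.InRange at h
  unfold pnorm
  simp only [PySem.List.pySetD, PySem.List.pySet?, PySem.List.pyIdx?]
  by_cases hi : i < 0
  · rw [if_neg (by omega : ¬ (0:Int) ≤ i), if_pos (by omega : -(xs.length:Int) ≤ i), if_pos hi]
    simp only [Option.map_some, Option.getD_some]
    congr 1
    omega
  · rw [if_pos (by omega : (0:Int) ≤ i), if_pos (by omega : i < (xs.length:Int)), if_neg hi]
    simp only [Option.map_some, Option.getD_some]

-- ---------- keys and their order ----------
def kAt (idx : PySem.Dict Int Int) (s : List (Option Int) × List (Option Int)) (p : Nat) :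
    Option (Int × Int) :=
  (s.1.getD p none).map (fun t => (t, idx.getD ((s.2.getD p none).getD 0) 0))

def kleB : Option (Int × Int) → Option (Int × Int) → Bool
  | _, none => true
  | none, some _ => false
  | some a, some b => decide (a.1 < b.1 ∨ (a.1 = b.1 ∧ a.2 ≤ b.2))

def kltB : Option (Int × Int) → Option (Int × Int) → Bool
  | none, _ => false
  | some _, none => true
  | some a, some b => decide (a.1 < b.1 ∨ (a.1 = b.1 ∧ a.2 < b.2))

def kbump : Option (Int × Int) → Option (Int × Int)
  | none => none
  | some a => some (a.1 + 1, a.2)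

theorem kle_refl (a : Option (Int × Int)) : kleB a a = true := by
  cases a <;> simp [kleB]

theorem kle_trans {a b c : Option (Int × Int)} (h1 : kleB a b = true) (h2 : kleB b c = true) :
    kleB a c = true := by
  rcases a with _ | ⟨a1, a2⟩ <;> rcases b with _ | ⟨b1, b2⟩ <;> rcases c with _ | ⟨c1, c2⟩ <;> simp_all [kleB] <;> omega

theorem kle_antisymm {a b : Option (Int × Int)} (h1 : kleB a b = true) (h2 : kleB b a = true) :
    a = b := by
  rcases a with _ | ⟨a1, a2⟩ <;> rcases b with _ | ⟨b1, b2⟩ <;> simp_all [kleB] <;> omega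

theorem klt_kle {a b : Option (Int × Int)} (h : kltB a b = true) : kleB a b = true := by
  rcases a with _ | ⟨a1, a2⟩ <;> rcases b with _ | ⟨b1, b2⟩ <;> simp_all [kltB, kleB] <;> omega

theorem not_klt_iff_kle {a b : Option (Int × Int)} : kltB a b = false ↔ kleB b a = true := by
  rcases a with _ | ⟨a1, a2⟩ <;> rcases b with _ | ⟨b1, b2⟩ <;> simp [kltB, kleB] <;> omega

theorem klt_of_klt_of_kle {a b c : Option (Int × Int)} (h1 : kltB a b = true)
    (h2 : kleB b c = true) : kltB a c = true := by
  rcases a with _ | ⟨a1, a2⟩ <;> rcases b with _ | ⟨b1, b2⟩ <;> rcases c with _ | ⟨c1, c2⟩ <;> simp_all [kltB, kleB] <;> omega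

theorem kbump_mono {a b : Option (Int × Int)} (h : kleB a b = true) :
    kleB (kbump a) (kbump b) = true := by
  rcases a with _ | ⟨a1, a2⟩ <;> rcases b with _ | ⟨b1, b2⟩ <;> simp_all [kleB, kbump] <;> omega

-- ---------- the elementary relaxation step ----------
def rstep (idx : PySem.Dict Int Int) (p q : Nat)
    (s : List (Option Int) × List (Option Int)) : List (Option Int) × List (Option Int) :=
  match s.1.getD p none with
  | none => s
  | some tp =>
    let mu := s.2.getD p none
    if kltB (some (tp + 1, idx.getD (mu.getD 0) 0)) (kAt idx s q) then
      (s.1.set q (some (tp + 1)), s.2.set q mu)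
    else s

-- ---------- generic getD/set facts specialised to our states ----------
theorem getD_set_self {α : Type} (l : List α) (q : Nat) (v d : α) (h : q < l.length) :
    (l.set q v).getD q d = v := by
  simp [List.getD_eq_getElem?_getD, h]

theorem getD_set_ne {α : Type} (l : List α) {q r : Nat} (v : α) (d : α) (h : r ≠ q) :
    (l.set q v).getD r d = l.getD r d := by
  simp [List.getD_eq_getElem?_getD, List.getElem?_set_ne (by omega : q ≠ r)]

theorem set_getD_self {α : Type} (l : List α) (q : Nat) (v d : α) (h : l.getD q d = v)
    (hne : v ≠ d) : l.set q v = l := by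
  by_cases hq : q < l.length
  · rw [List.getD_eq_getElem?_getD, List.getElem?_eq_getElem hq, Option.getD_some] at h
    rw [← h]
    exact List.set_getElem_self hq
  · exact List.set_eq_of_length_le (by omega)

-- ---------- facts about rstep ----------
theorem rstep_cases (idx : PySem.Dict Int Int) (p q : Nat)
    (s : List (Option Int) × List (Option Int)) :
    rstep idx p q s = s ∨
    (kltB (kbump (kAt idx s p)) (kAt idx s q) = true ∧
     ∃ tp, s.1.getD p none = some tp ∧
       rstep idx p q s = (s.1.set q (some (tp + 1)), s.2.set q (s.2.getD p none))) := by
  unfold rstep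
  cases hp : s.1.getD p none with
  | none => exact Or.inl rfl
  | some tp =>
    simp only []
    split
    · next hc =>
      refine Or.inr ⟨?_, tp, rfl, rfl⟩
      have : kbump (kAt idx s p) = some (tp + 1, idx.getD ((s.2.getD p none).getD 0) 0) := by
        unfold kAt kbump; rw [hp]; rfl
      rw [this]
      exact hc
    · exact Or.inl rfl

theorem rstep_length1 (idx : PySem.Dict Int Int) (p q : Nat)
    (s : List (Option Int) × List (Option Int)) :
    (rstep idx p q s).1.length = s.1.length := by
  rcases rstep_cases idx p q s with h | ⟨_, tp, _, h⟩ <;> simp [h]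

theorem rstep_length2 (idx : PySem.Dict Int Int) (p q : Nat)
    (s : List (Option Int) × List (Option Int)) :
    (rstep idx p q s).2.length = s.2.length := by
  rcases rstep_cases idx p q s with h | ⟨_, tp, _, h⟩ <;> simp [h]

theorem rstep_kAt_other (idx : PySem.Dict Int Int) (p q : Nat)
    (s : List (Option Int) × List (Option Int)) {r : Nat} (h : r ≠ q) :
    kAt idx (rstep idx p q s) r = kAt idx s r := by
  rcases rstep_cases idx p q s with he | ⟨_, tp, _, he⟩
  · rw [he]
  · rw [he]; unfold kAt; simp only [getD_set_ne _ _ _ h]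

theorem rstep_kAt_self (idx : PySem.Dict Int Int) (p q : Nat)
    (s : List (Option Int) × List (Option Int)) (hq1 : q < s.1.length) (hq2 : q < s.2.length) :
    kAt idx (rstep idx p q s) q =
      (if kltB (kbump (kAt idx s p)) (kAt idx s q) = true then kbump (kAt idx s p)
       else kAt idx s q) := by
  unfold rstep
  cases hp : s.1.getD p none with
  | none =>
    have : kbump (kAt idx s p) = none := by unfold kAt kbump; rw [hp]; rfl
    rw [this]
    simp [kltB]
  | some tp =>
    have hb : kbump (kAt idx s p) = some (tp + 1, idx.getD ((s.2.getD p none).getD 0) 0) := by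
      unfold kAt kbump; rw [hp]; rfl
    simp only [hb]
    split
    · unfold kAt
      rw [getD_set_self _ _ _ _ hq1, getD_set_self _ _ _ _ hq2]
      rfl
    · rfl

theorem rstep_src (idx : PySem.Dict Int Int) (p q : Nat)
    (s : List (Option Int) × List (Option Int)) :
    (rstep idx p q s).1.getD p none = s.1.getD p none ∧
    (rstep idx p q s).2.getD p none = s.2.getD p none := by
  rcases rstep_cases idx p q s with he | ⟨hc, tp, hp, he⟩
  · rw [he]; exact ⟨rfl, rfl⟩
  · by_cases hpq : p = q
    · subst hpq
      -- a self-edge never improves, contradiction with hc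
      exfalso
      have hk : kAt idx s p = some (tp, idx.getD ((s.2.getD p none).getD 0) 0) := by
        unfold kAt; rw [hp]; rfl
      rw [hk] at hc
      simp [kbump, kltB] at hc
    · rw [he]
      exact ⟨getD_set_ne _ _ _ hpq, getD_set_ne _ _ _ hpq⟩

theorem rstep_time_isSome (idx : PySem.Dict Int Int) (p q : Nat)
    (s : List (Option Int) × List (Option Int)) {r : Nat}
    (h : (s.1.getD r none).isSome) : ((rstep idx p q s).1.getD r none).isSome := by
  rcases rstep_cases idx p q s with he | ⟨_, tp, _, he⟩
  · rw [he]; exact h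
  · rw [he]
    by_cases hr : r = q
    · subst hr
      by_cases hlt : r < s.1.length
      · rw [getD_set_self _ _ _ _ hlt]; rfl
      · rw [List.set_eq_of_length_le (by omega)]; exact h
    · rw [getD_set_ne _ _ _ hr]; exact h

-- ---------- reachability by relaxation steps, stability, and the fixed-point argument ----------
def EdgeOf (G : List (List Int)) (p q : Nat) : Prop :=
  ∃ hp : p < G.length, q < G.length ∧ ∃ v ∈ G[p], q = pnorm G.length v

inductive ReachR (G : List (List Int)) (idx : PySem.Dict Int Int)
    (s0 : List (Option Int) × List (Option Int)) :
    List (Option Int) × List (Option Int) → Prop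
  | refl : ReachR G idx s0 s0
  | step {s : List (Option Int) × List (Option Int)} {p q : Nat} :
      ReachR G idx s0 s → EdgeOf G p q → ReachR G idx s0 (rstep idx p q s)

def StableK (G : List (List Int)) (idx : PySem.Dict Int Int)
    (s : List (Option Int) × List (Option Int)) : Prop :=
  ∀ p q, EdgeOf G p q → kltB (kbump (kAt idx s p)) (kAt idx s q) = false

theorem rstep_of_not_klt {idx : PySem.Dict Int Int} {p q : Nat}
    {s : List (Option Int) × List (Option Int)}
    (h : kltB (kbump (kAt idx s p)) (kAt idx s q) = false) : rstep idx p q s = s := by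
  rcases rstep_cases idx p q s with he | ⟨hc, _, _, _⟩
  · exact he
  · rw [hc] at h; cases h

theorem reach_trans {G : List (List Int)} {idx : PySem.Dict Int Int}
    {a b c : List (Option Int) × List (Option Int)}
    (h1 : ReachR G idx a b) (h2 : ReachR G idx b c) : ReachR G idx a c := by
  induction h2 with
  | refl => exact h1
  | step hr he ih => exact ReachR.step ih he

theorem reach_length1 {G : List (List Int)} {idx : PySem.Dict Int Int}
    {s0 s : List (Option Int) × List (Option Int)} (h : ReachR G idx s0 s) :
    s.1.length = s0.1.length := by
  induction h with
  | refl => rfl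
  | step hr he ih => rw [rstep_length1]; exact ih

theorem reach_length2 {G : List (List Int)} {idx : PySem.Dict Int Int}
    {s0 s : List (Option Int) × List (Option Int)} (h : ReachR G idx s0 s) :
    s.2.length = s0.2.length := by
  induction h with
  | refl => rfl
  | step hr he ih => rw [rstep_length2]; exact ih

theorem reach_kle {G : List (List Int)} {idx : PySem.Dict Int Int}
    {s0 s : List (Option Int) × List (Option Int)} (h : ReachR G idx s0 s)
    (hL1 : s0.1.length = G.length) (hL2 : s0.2.length = G.length) :
    ∀ r, kleB (kAt idx s r) (kAt idx s0 r) = true := by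
  induction h with
  | refl => exact fun r => kle_refl _
  | @step s p q hr he ih =>
    intro r
    by_cases hrq : r = q
    · subst hrq
      rw [rstep_kAt_self idx p r s (by rw [reach_length1 hr, hL1]; exact he.2.1)
            (by rw [reach_length2 hr, hL2]; exact he.2.1)]
      split
      · next hc => exact kle_trans (klt_kle hc) (ih r)
      · exact ih r
    · rw [rstep_kAt_other idx p q s hrq]
      exact ih r

theorem stable_le_reach {G : List (List Int)} {idx : PySem.Dict Int Int}
    {s0 s τ : List (Option Int) × List (Option Int)}
    (h : ReachR G idx s0 s) (hτ : StableK G idx τ)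
    (hbase : ∀ r, kleB (kAt idx τ r) (kAt idx s0 r) = true)
    (hL1 : s0.1.length = G.length) (hL2 : s0.2.length = G.length) :
    ∀ r, kleB (kAt idx τ r) (kAt idx s r) = true := by
  induction h with
  | refl => exact hbase
  | @step s p q hr he ih =>
    intro r
    by_cases hrq : r = q
    · subst hrq
      rw [rstep_kAt_self idx p r s (by rw [reach_length1 hr, hL1]; exact he.2.1)
            (by rw [reach_length2 hr, hL2]; exact he.2.1)]
      split
      · exact kle_trans (not_klt_iff_kle.mp (hτ p r he)) (kbump_mono (ih p))
      · exact ih r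
    · rw [rstep_kAt_other idx p q s hrq]
      exact ih r

theorem stable_reach_kAt_eq {G : List (List Int)} {idx : PySem.Dict Int Int}
    {s0 σ τ : List (Option Int) × List (Option Int)}
    (hσ : ReachR G idx s0 σ) (hτ : ReachR G idx s0 τ)
    (hsσ : StableK G idx σ) (hsτ : StableK G idx τ)
    (hL1 : s0.1.length = G.length) (hL2 : s0.2.length = G.length) :
    ∀ r, kAt idx σ r = kAt idx τ r := by
  intro r
  exact kle_antisymm
    (stable_le_reach hτ hsσ (reach_kle hσ hL1 hL2) hL1 hL2 r)
    (stable_le_reach hσ hsτ (reach_kle hτ hL1 hL2) hL1 hL2 r)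

-- ---------- state invariants ----------
def MInv (idx : PySem.Dict Int Int) (s : List (Option Int) × List (Option Int)) : Prop :=
  ∀ p : Nat, (s.1.getD p none = none ↔ s.2.getD p none = none) ∧
    ∀ m, s.2.getD p none = some m → (idx.get? m).isSome

def TInv (n : Nat) (s : List (Option Int) × List (Option Int)) : Prop :=
  ∀ (p : Nat) (t : Int), s.1.getD p none = some t →
    0 ≤ t ∧ t.toNat + s.1.count none ≤ n

def GInv (idx : PySem.Dict Int Int) (n : Nat)
    (s : List (Option Int) × List (Option Int)) : Prop :=
  s.1.length = n ∧ s.2.length = n ∧ MInv idx s ∧ TInv n s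

def IdxSpec (idx : PySem.Dict Int Int) (T : List Int) : Prop :=
  ∀ m j, idx.get? m = some j →
    ∃ jn : Nat, j = (jn : Int) ∧ jn < T.length ∧ T[jn]? = some m

theorem count_none_set_of_none {l : List (Option Int)} {q : Nat} (t : Int)
    (hq : q < l.length) (h : l.getD q none = none) :
    (l.set q (some t)).count none + 1 = l.count none := by
  induction l generalizing q with
  | nil => simp at hq
  | cons x xs ih =>
    cases q with
    | zero =>
      simp only [List.getD_cons_zero] at h
      subst h
      simp [List.count_cons]
    | succ q' =>
      simp only [List.getD_cons_succ] at h
      have := ih (q := q') (by simpa using hq) h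
      simp only [List.set_cons_succ, List.count_cons]
      omega

theorem count_none_set_of_some {l : List (Option Int)} {q : Nat} (t t' : Int)
    (h : l.getD q none = some t') :
    (l.set q (some t)).count none = l.count none := by
  induction l generalizing q with
  | nil => simp
  | cons x xs ih =>
    cases q with
    | zero =>
      simp only [List.getD_cons_zero] at h
      subst h
      simp [List.count_cons]
    | succ q' =>
      simp only [List.getD_cons_succ] at h
      have := ih (q := q') h
      simp only [List.set_cons_succ, List.count_cons]
      omega

theorem GInv_rstep {idx : PySem.Dict Int Int} {n : Nat} (p : Nat) {q : Nat}
    {s : List (Option Int) × List (Option Int)}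
    (hg : GInv idx n s) (hq : q < n) : GInv idx n (rstep idx p q s) := by
  obtain ⟨hl1, hl2, hm, ht⟩ := hg
  rcases rstep_cases idx p q s with he | ⟨hc, tp, hp, he⟩
  · rw [he]; exact ⟨hl1, hl2, hm, ht⟩
  · obtain ⟨hmp, _⟩ := hm p
    have hmarkp : ∃ m, s.2.getD p none = some m := by
      cases hmk : s.2.getD p none with
      | none => rw [(hmp.mpr hmk)] at hp; cases hp
      | some m => exact ⟨m, rfl⟩
    obtain ⟨mp, hmp'⟩ := hmarkp
    rw [he]
    refine ⟨by simpa using hl1, by simpa using hl2, ?_, ?_⟩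
    · intro r
      by_cases hr : r = q
      · subst hr
        rw [getD_set_self _ _ _ _ (by omega), getD_set_self _ _ _ _ (by omega), hmp']
        exact ⟨by simp, fun m hm' => by
          cases hm'; exact (hm p).2 mp hmp'⟩
      · rw [getD_set_ne _ _ _ hr, getD_set_ne _ _ _ hr]
        exact hm r
    · intro r t hr
      dsimp only at hr ⊢
      have hbp := ht p tp hp
      by_cases hrq : r = q
      · subst hrq
        rw [getD_set_self _ _ _ _ (by omega)] at hr
        cases hr
        cases hqold : s.1.getD r none with
        | none =>
          have hcount := count_none_set_of_none (tp + 1) (by omega) hqold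
          omega
        | some tq =>
          have hcount := count_none_set_of_some (tp + 1) tq hqold
          -- from the improvement condition, tp + 1 ≤ tq
          have hkq : kAt idx s r = some (tq, idx.getD ((s.2.getD r none).getD 0) 0) := by
            unfold kAt; rw [hqold]; rfl
          rw [hkq] at hc
          have hb : kbump (kAt idx s p) = some (tp + 1, idx.getD ((s.2.getD p none).getD 0) 0) := by
            unfold kAt kbump; rw [hp]; rfl
          rw [hb] at hc
          simp only [kltB, decide_eq_true_eq] at hc
          have hle : tp + 1 ≤ tq := by rcases hc with h | ⟨h, _⟩ <;> omega
          have := ht r tq hqold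
          omega
      · rw [getD_set_ne _ _ _ hrq] at hr
        have := ht r t hr
        cases hqold : s.1.getD q none with
        | none =>
          have hcount := count_none_set_of_none (tp + 1) (by omega) hqold
          omega
        | some tq =>
          have hcount := count_none_set_of_some (tp + 1) tq hqold
          omega

-- key components are bounded in good states
theorem kAt_bound {idx : PySem.Dict Int Int} {n : Nat} {T : List Int}
    {s : List (Option Int) × List (Option Int)} {p : Nat} {t i : Int}
    (hg : GInv idx n s) (hio : IdxSpec idx T)
    (h : kAt idx s p = some (t, i)) :
    0 ≤ t ∧ t.toNat ≤ n ∧ 0 ≤ i ∧ i.toNat < T.length := by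
  obtain ⟨hl1, hl2, hm, ht⟩ := hg
  unfold kAt at h
  cases htp : s.1.getD p none with
  | none => rw [htp] at h; cases h
  | some tv =>
    rw [htp] at h
    simp only [Option.map_some, Option.some.injEq, Prod.mk.injEq] at h
    obtain ⟨rfl, hi⟩ := h
    have hb := ht _ _ htp
    obtain ⟨hmp, hkey⟩ := hm p
    cases hmk : s.2.getD p none with
    | none => rw [hmp.mpr hmk] at htp; cases htp
    | some m =>
      have hs := hkey m hmk
      cases hj : idx.get? m with
      | none => rw [hj] at hs; cases hs
      | some j =>
        obtain ⟨jn, rfl, hjn, _⟩ := hio m j hj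
        have : idx.getD m 0 = (jn : Int) := PySem.Dict.getD_of_get?_eq_some idx 0 hj
        rw [hmk] at hi
        simp only [Option.getD_some] at hi
        subst hi
        rw [this]
        refine ⟨by omega, by omega, by omega, by omega⟩

-- ---------- the potential ----------
def pot (n K : Nat) : Option (Int × Int) → Nat
  | none => (n+1)*K
  | some a => a.1.toNat * K + a.2.toNat

def phi (idx : PySem.Dict Int Int) (n K : Nat)
    (s : List (Option Int) × List (Option Int)) : Nat :=
  ∑ p ∈ Finset.range n, pot n K (kAt idx s p)

def KeyOK (n K : Nat) (a : Option (Int × Int)) : Prop :=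
  ∀ t i, a = some (t, i) → 0 ≤ t ∧ t.toNat ≤ n ∧ 0 ≤ i ∧ i.toNat < K

theorem keyOK_of_GInv {idx : PySem.Dict Int Int} {n : Nat} {T : List Int}
    {s : List (Option Int) × List (Option Int)}
    (hg : GInv idx n s) (hio : IdxSpec idx T) (p : Nat) :
    KeyOK n T.length (kAt idx s p) := by
  intro t i h
  exact kAt_bound hg hio h

theorem pot_le_top {n K : Nat} {a : Option (Int × Int)} (ha : KeyOK n K a) (hK : 0 < K) :
    pot n K a ≤ (n+1)*K := by
  rcases a with _ | ⟨t1, i1⟩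
  · exact le_refl _
  · have h1 := ha t1 i1 rfl
    simp only [pot]
    refine le_of_lt ?_
    calc t1.toNat * K + i1.toNat < (t1.toNat + 1) * K := by rw [Nat.succ_mul]; omega
    _ ≤ (n+1)*K := Nat.mul_le_mul_right K (by omega)

theorem phi_le_top {idx : PySem.Dict Int Int} {n : Nat} {T : List Int}
    {s : List (Option Int) × List (Option Int)}
    (hg : GInv idx n s) (hio : IdxSpec idx T) (hK : 0 < T.length) :
    phi idx n T.length s ≤ n * ((n+1) * T.length) := by
  unfold phi
  calc ∑ p ∈ Finset.range n, pot n T.length (kAt idx s p)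
      ≤ ∑ _p ∈ Finset.range n, (n+1) * T.length :=
        Finset.sum_le_sum (fun p _ => pot_le_top (keyOK_of_GInv hg hio p) hK)
  _ = n * ((n+1) * T.length) := by rw [Finset.sum_const, Finset.card_range, smul_eq_mul]

theorem kAt_none_iff {idx : PySem.Dict Int Int}
    {s : List (Option Int) × List (Option Int)} {p : Nat} :
    kAt idx s p = none ↔ s.1.getD p none = none := by
  unfold kAt
  cases s.1.getD p none <;> simp

theorem count_none_pos {l : List (Option Int)} {q : Nat}
    (hq : q < l.length) (h : l.getD q none = none) : 1 ≤ l.count none := by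
  have : (none : Option Int) ∈ l := by
    rw [List.getD_eq_getElem?_getD, List.getElem?_eq_getElem hq, Option.getD_some] at h
    rw [← h]
    exact List.getElem_mem hq
  exact List.count_pos_iff.mpr this

theorem pot_bump_lt {idx : PySem.Dict Int Int} {n : Nat} {T : List Int} {p q : Nat}
    {s : List (Option Int) × List (Option Int)}
    (hg : GInv idx n s) (hio : IdxSpec idx T) (hq : q < n)
    (hc : kltB (kbump (kAt idx s p)) (kAt idx s q) = true) :
    pot n T.length (kbump (kAt idx s p)) < pot n T.length (kAt idx s q) := by
  rcases hkp : kAt idx s p with _ | ⟨tp, ip⟩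
  · rw [hkp] at hc; simp [kbump, kltB] at hc
  · have hbp := kAt_bound hg hio hkp
    rw [hkp] at hc
    have htp : s.1.getD p none = some tp := by
      unfold kAt at hkp
      cases hx : s.1.getD p none with
      | none => rw [hx] at hkp; cases hkp
      | some tv => rw [hx] at hkp; simp at hkp; rw [hkp.1]
    rcases hkq : kAt idx s q with _ | ⟨tq, iq⟩
    · -- target still infinite: there is at least one unreached node, so tp + 1 ≤ n
      have hqnone : s.1.getD q none = none := kAt_none_iff.mp hkq
      have hcnt := count_none_pos (l := s.1) (q := q) (by rw [hg.1]; omega) hqnone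
      have hb := hg.2.2.2 p tp htp
      simp only [kbump, pot]
      have h1 : (tp + 1).toNat ≤ n := by omega
      have h2 : ip.toNat < T.length := by omega
      calc (tp+1).toNat * T.length + ip.toNat < ((tp+1).toNat + 1) * T.length := by rw [Nat.succ_mul]; omega
      _ ≤ (n+1) * T.length := Nat.mul_le_mul_right _ (by omega)
    · have hbq := kAt_bound hg hio hkq
      rw [hkq] at hc
      simp only [kbump, kltB, decide_eq_true_eq] at hc
      simp only [kbump, pot]
      rcases hc with h | ⟨h, h'⟩
      · have h2 : ip.toNat < T.length := by omega
        have h3 : (tp+1).toNat + 1 ≤ tq.toNat := by omega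
        calc (tp+1).toNat * T.length + ip.toNat < ((tp+1).toNat + 1) * T.length := by rw [Nat.succ_mul]; omega
        _ ≤ tq.toNat * T.length := Nat.mul_le_mul_right _ h3
        _ ≤ tq.toNat * T.length + iq.toNat := by omega
      · have : (tp+1).toNat = tq.toNat := by omega
        rw [this]
        omega

theorem phi_rstep_le {idx : PySem.Dict Int Int} {n : Nat} {T : List Int} (p : Nat) {q : Nat}
    {s : List (Option Int) × List (Option Int)}
    (hg : GInv idx n s) (hio : IdxSpec idx T) (hK : 0 < T.length) (hq : q < n) :
    phi idx n T.length (rstep idx p q s) ≤ phi idx n T.length s := by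
  unfold phi
  refine Finset.sum_le_sum (fun r hr => ?_)
  by_cases hrq : r = q
  · subst hrq
    rw [rstep_kAt_self idx p r s (by rw [hg.1]; omega) (by rw [hg.2.1]; omega)]
    split
    · next hc => exact le_of_lt (pot_bump_lt hg hio hq hc)
    · exact le_refl _
  · rw [rstep_kAt_other idx p q s hrq]

theorem phi_rstep_lt {idx : PySem.Dict Int Int} {n : Nat} {T : List Int} (p : Nat) {q : Nat}
    {s : List (Option Int) × List (Option Int)}
    (hg : GInv idx n s) (hio : IdxSpec idx T) (hK : 0 < T.length) (hq : q < n)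
    (hc : kltB (kbump (kAt idx s p)) (kAt idx s q) = true) :
    phi idx n T.length (rstep idx p q s) < phi idx n T.length s := by
  unfold phi
  refine Finset.sum_lt_sum (f := fun r => pot n T.length (kAt idx (rstep idx p q s) r))
    (g := fun r => pot n T.length (kAt idx s r)) (fun r hr => ?_) ⟨q, Finset.mem_range.mpr hq, ?_⟩
  · show pot n T.length (kAt idx (rstep idx p q s) r) ≤ pot n T.length (kAt idx s r)
    by_cases hrq : r = q
    · subst hrq
      rw [rstep_kAt_self idx p r s (by rw [hg.1]; omega) (by rw [hg.2.1]; omega)]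
      by_cases hc' : kltB (kbump (kAt idx s p)) (kAt idx s r) = true
      · rw [if_pos hc']
        exact Nat.le_of_lt (pot_bump_lt hg hio (by simpa using hr) hc')
      · rw [if_neg hc']
    · rw [rstep_kAt_other idx p q s hrq]
  · show pot n T.length (kAt idx (rstep idx p q s) q) < pot n T.length (kAt idx s q)
    rw [rstep_kAt_self idx p q s (by rw [hg.1]; omega) (by rw [hg.2.1]; omega), if_pos hc]
    exact pot_bump_lt hg hio hq hc

-- ---------- the ports' inner steps are rstep ----------
theorem aRelax_eq_rstep {n : Nat} {idx : PySem.Dict Int Int} {u v t tp : Int}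
    {Q : List Int} {s : List (Option Int) × List (Option Int)}
    (hu : PySem.Raise.InRange n u) (hv : PySem.Raise.InRange n v)
    (hl1 : s.1.length = n) (hl2 : s.2.length = n)
    (hp : s.1.getD (pnorm n u) none = some tp) (ht : t = tp + 1) :
    aRelax idx u t (s.1, s.2, Q) v =
      ((rstep idx (pnorm n u) (pnorm n v) s).1, (rstep idx (pnorm n u) (pnorm n v) s).2,
       Q ++ (if kltB (kbump (kAt idx s (pnorm n u))) (kAt idx s (pnorm n v)) = true
             then [v] else [])) := by
  subst ht
  have hgv : PySem.List.pyGetD s.1 v none = s.1.getD (pnorm n v) none := by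
    rw [pyGetD_pnorm _ (by rw [hl1]; exact hv), hl1]
  have hgv2 : PySem.List.pyGetD s.2 v none = s.2.getD (pnorm n v) none := by
    rw [pyGetD_pnorm _ (by rw [hl2]; exact hv), hl2]
  have hgu2 : PySem.List.pyGetD s.2 u none = s.2.getD (pnorm n u) none := by
    rw [pyGetD_pnorm _ (by rw [hl2]; exact hu), hl2]
  have hsv1 : ∀ x, PySem.List.pySetD s.1 v x = s.1.set (pnorm n v) x := by
    intro x; rw [pySetD_pnorm _ (by rw [hl1]; exact hv), hl1]
  have hsv2 : ∀ x, PySem.List.pySetD s.2 v x = s.2.set (pnorm n v) x := by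
    intro x; rw [pySetD_pnorm _ (by rw [hl2]; exact hv), hl2]
  have hb : kbump (kAt idx s (pnorm n u)) =
      some (tp + 1, idx.getD ((s.2.getD (pnorm n u) none).getD 0) 0) := by
    unfold kAt kbump; rw [hp]; rfl
  unfold aRelax rstep
  rw [hgv, hgu2, hsv1 (some (tp+1)), hsv2, hgv2, hp, hb]
  cases hq : s.1.getD (pnorm n v) none with
  | none =>
    have hkq : kAt idx s (pnorm n v) = none := kAt_none_iff.mpr hq
    rw [hkq]
    have hkc : kltB (some (tp + 1, idx.getD ((s.2.getD (pnorm n u) none).getD 0) 0))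
        (none : Option (Int × Int)) = true := by simp [kltB]
    rw [if_pos (by simp [aGt] : aGt none (tp+1) = true)]
    simp only [List.getD_eq_getElem?_getD] at hkc
    simp [hkc]
  | some tq =>
    have hkq : kAt idx s (pnorm n v) =
        some (tq, idx.getD ((s.2.getD (pnorm n v) none).getD 0) 0) := by
      unfold kAt; rw [hq]; rfl
    rw [hkq]
    by_cases hlt : tp + 1 < tq
    · have hkc : kltB (some (tp + 1, idx.getD ((s.2.getD (pnorm n u) none).getD 0) 0))
          (some (tq, idx.getD ((s.2.getD (pnorm n v) none).getD 0) 0)) = true := by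
        simp only [kltB, decide_eq_true_eq]; left; exact hlt
      rw [if_pos (by simp [aGt]; omega : aGt (some tq) (tp+1) = true)]
      simp only [List.getD_eq_getElem?_getD] at hkc
      simp [hkc]
    · rw [if_neg (by simp [aGt]; omega : ¬ aGt (some tq) (tp+1) = true)]
      by_cases heq : tq = tp + 1
      · by_cases hiq : idx.getD ((s.2.getD (pnorm n u) none).getD 0) 0 <
            idx.getD ((s.2.getD (pnorm n v) none).getD 0) 0
        · have hkc : kltB (some (tp + 1, idx.getD ((s.2.getD (pnorm n u) none).getD 0) 0))
              (some (tq, idx.getD ((s.2.getD (pnorm n v) none).getD 0) 0)) = true := by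
            simp only [kltB, decide_eq_true_eq]; right; exact ⟨by omega, hiq⟩
          rw [if_pos (by simp only [List.getD_eq_getElem?_getD] at hiq; simp [aEq, heq, hiq] : (aEq (some tq) (tp+1) &&
              decide (idx.getD ((s.2.getD (pnorm n u) none).getD 0) 0 <
                idx.getD ((s.2.getD (pnorm n v) none).getD 0) 0)) = true)]
          have hTeq : s.1.set (pnorm n v) (some (tp+1)) = s.1 :=
            set_getD_self _ _ _ _ (by rw [hq, heq]) (by simp)
          simp only [List.getD_eq_getElem?_getD] at hkc
          simp only [List.getD_eq_getElem?_getD] at hTeq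
          simp [hkc, hTeq]
        · have hkc : kltB (some (tp + 1, idx.getD ((s.2.getD (pnorm n u) none).getD 0) 0))
              (some (tq, idx.getD ((s.2.getD (pnorm n v) none).getD 0) 0)) = false := by
            simp only [kltB, decide_eq_false_iff_not]; omega
          rw [if_neg (by simp only [List.getD_eq_getElem?_getD] at hiq; simp [aEq, hiq] : ¬ (aEq (some tq) (tp+1) &&
              decide (idx.getD ((s.2.getD (pnorm n u) none).getD 0) 0 <
                idx.getD ((s.2.getD (pnorm n v) none).getD 0) 0)) = true)]
          simp only [List.getD_eq_getElem?_getD] at hkc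
          simp [hkc]
      · have hkc : kltB (some (tp + 1, idx.getD ((s.2.getD (pnorm n u) none).getD 0) 0))
            (some (tq, idx.getD ((s.2.getD (pnorm n v) none).getD 0) 0)) = false := by
          simp only [kltB, decide_eq_false_iff_not]; omega
        rw [if_neg (by simp [aEq]; omega : ¬ (aEq (some tq) (tp+1) &&
            decide (idx.getD ((s.2.getD (pnorm n u) none).getD 0) 0 <
              idx.getD ((s.2.getD (pnorm n v) none).getD 0) 0)) = true)]
        simp only [List.getD_eq_getElem?_getD] at hkc
        simp [hkc]

theorem bRelax_eq_rstep {n : Nat} {idx : PySem.Dict Int Int} {u v t tp : Int}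
    {c : Bool} {s : List (Option Int) × List (Option Int)}
    (hu : PySem.Raise.InRange n u) (hv : PySem.Raise.InRange n v)
    (hl1 : s.1.length = n) (hl2 : s.2.length = n)
    (hp : s.1.getD (pnorm n u) none = some tp) (ht : t = tp + 1) :
    bRelax idx u t (s.1, s.2, c) v =
      ((rstep idx (pnorm n u) (pnorm n v) s).1, (rstep idx (pnorm n u) (pnorm n v) s).2,
       c || kltB (kbump (kAt idx s (pnorm n u))) (kAt idx s (pnorm n v))) := by
  subst ht
  have hgv : PySem.List.pyGetD s.1 v none = s.1.getD (pnorm n v) none := by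
    rw [pyGetD_pnorm _ (by rw [hl1]; exact hv), hl1]
  have hgv2 : PySem.List.pyGetD s.2 v none = s.2.getD (pnorm n v) none := by
    rw [pyGetD_pnorm _ (by rw [hl2]; exact hv), hl2]
  have hgu2 : PySem.List.pyGetD s.2 u none = s.2.getD (pnorm n u) none := by
    rw [pyGetD_pnorm _ (by rw [hl2]; exact hu), hl2]
  have hsv1 : ∀ x, PySem.List.pySetD s.1 v x = s.1.set (pnorm n v) x := by
    intro x; rw [pySetD_pnorm _ (by rw [hl1]; exact hv), hl1]
  have hsv2 : ∀ x, PySem.List.pySetD s.2 v x = s.2.set (pnorm n v) x := by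
    intro x; rw [pySetD_pnorm _ (by rw [hl2]; exact hv), hl2]
  have hb : kbump (kAt idx s (pnorm n u)) =
      some (tp + 1, idx.getD ((s.2.getD (pnorm n u) none).getD 0) 0) := by
    unfold kAt kbump; rw [hp]; rfl
  unfold bRelax rstep
  rw [hgv, hgu2, hsv1 (some (tp+1)), hsv2, hgv2, hp, hb]
  cases hq : s.1.getD (pnorm n v) none with
  | none =>
    have hkq : kAt idx s (pnorm n v) = none := kAt_none_iff.mpr hq
    rw [hkq]
    have hkc : kltB (some (tp + 1, idx.getD ((s.2.getD (pnorm n u) none).getD 0) 0))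
        (none : Option (Int × Int)) = true := by simp [kltB]
    rw [if_pos (by simp [bCond] : bCond idx none (tp+1)
        (s.2.getD (pnorm n v) none) (s.2.getD (pnorm n u) none) = true)]
    simp only [List.getD_eq_getElem?_getD] at hkc
    simp [hkc]
  | some tq =>
    have hkq : kAt idx s (pnorm n v) =
        some (tq, idx.getD ((s.2.getD (pnorm n v) none).getD 0) 0) := by
      unfold kAt; rw [hq]; rfl
    rw [hkq]
    by_cases hcnd : (tp + 1 < tq ∨ (tq = tp + 1 ∧
        idx.getD ((s.2.getD (pnorm n u) none).getD 0) 0 <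
          idx.getD ((s.2.getD (pnorm n v) none).getD 0) 0))
    · have hkc : kltB (some (tp + 1, idx.getD ((s.2.getD (pnorm n u) none).getD 0) 0))
          (some (tq, idx.getD ((s.2.getD (pnorm n v) none).getD 0) 0)) = true := by
        simp only [kltB, decide_eq_true_eq]; omega
      rw [if_pos (by simp only [List.getD_eq_getElem?_getD] at hcnd; simp [bCond]; omega : bCond idx (some tq) (tp+1)
          (s.2.getD (pnorm n v) none) (s.2.getD (pnorm n u) none) = true)]
      simp only [List.getD_eq_getElem?_getD] at hkc
      simp [hkc]
    · have hkc : kltB (some (tp + 1, idx.getD ((s.2.getD (pnorm n u) none).getD 0) 0))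
          (some (tq, idx.getD ((s.2.getD (pnorm n v) none).getD 0) 0)) = false := by
        simp only [kltB, decide_eq_false_iff_not]; omega
      rw [if_neg (by simp only [List.getD_eq_getElem?_getD] at hcnd; simp [bCond]; omega : ¬ bCond idx (some tq) (tp+1)
          (s.2.getD (pnorm n v) none) (s.2.getD (pnorm n u) none) = true)]
      simp only [List.getD_eq_getElem?_getD] at hkc
      simp [hkc]

-- ---------- the shared initialisation of both ports ----------
def initTM (l : List (Int × Int)) (s : List (Option Int) × List (Option Int)) :
    List (Option Int) × List (Option Int) :=
  match l with
  | [] => s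
  | x :: l' =>
    initTM l' (PySem.List.pySetD s.1 x.2 (some (0:Int)), PySem.List.pySetD s.2 x.2 (some x.2))

def initIdx (l : List (Int × Int)) (d : PySem.Dict Int Int) : PySem.Dict Int Int :=
  match l with
  | [] => d
  | x :: l' => initIdx l' (d.insert x.2 x.1)

theorem aInit_fold_eq (l : List (Int × Int)) :
    ∀ (s : List (Option Int) × List (Option Int)) (d : PySem.Dict Int Int) (Q : List Int),
    l.foldl (fun st (x : Int × Int) =>
        (PySem.List.pySetD st.1 x.2 (some (0:Int)),
         PySem.List.pySetD st.2.1 x.2 (some x.2),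
         st.2.2.1.insert x.2 x.1,
         st.2.2.2 ++ [x.2])) (s.1, s.2, d, Q)
      = ((initTM l s).1, (initTM l s).2, initIdx l d, Q ++ l.map (·.2)) := by
  induction l with
  | nil => intro s d Q; simp [initTM, initIdx]
  | cons x l' ih =>
    intro s d Q
    simp only [List.foldl_cons, List.map_cons]
    have := ih (PySem.List.pySetD s.1 x.2 (some (0:Int)), PySem.List.pySetD s.2 x.2 (some x.2))
      (d.insert x.2 x.1) (Q ++ [x.2])
    simp only at this
    rw [this]
    simp [initTM, initIdx]

theorem bInit_fold_eq (l : List (Int × Int)) :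
    ∀ (s : List (Option Int) × List (Option Int)) (d : PySem.Dict Int Int),
    l.foldl (fun st (x : Int × Int) =>
        (PySem.List.pySetD st.1 x.2 (some (0:Int)),
         PySem.List.pySetD st.2.1 x.2 (some x.2),
         st.2.2.insert x.2 x.1)) (s.1, s.2, d)
      = ((initTM l s).1, (initTM l s).2, initIdx l d) := by
  induction l with
  | nil => intro s d; simp [initTM, initIdx]
  | cons x l' ih =>
    intro s d
    simp only [List.foldl_cons]
    have := ih (PySem.List.pySetD s.1 x.2 (some (0:Int)), PySem.List.pySetD s.2 x.2 (some x.2))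
      (d.insert x.2 x.1)
    simp only at this
    rw [this]
    simp [initTM, initIdx]

theorem initTM_lengths (l : List (Int × Int)) :
    ∀ s : List (Option Int) × List (Option Int),
    (initTM l s).1.length = s.1.length ∧ (initTM l s).2.length = s.2.length := by
  induction l with
  | nil => intro s; exact ⟨rfl, rfl⟩
  | cons x l' ih =>
    intro s
    have := ih (PySem.List.pySetD s.1 x.2 (some (0:Int)), PySem.List.pySetD s.2 x.2 (some x.2))
    simp only [initTM]
    rw [this.1, this.2]
    simp [PySem.List.length_pySetD]

theorem initTM_char (n : Nat) (l : List (Int × Int)) :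
    ∀ (s : List (Option Int) × List (Option Int)),
    (∀ x ∈ l, PySem.Raise.InRange n x.2) → s.1.length = n → s.2.length = n →
    ∀ p : Nat,
      ((∀ x ∈ l, pnorm n x.2 ≠ p) ∧ (initTM l s).1.getD p none = s.1.getD p none
         ∧ (initTM l s).2.getD p none = s.2.getD p none)
      ∨ (∃ x ∈ l, pnorm n x.2 = p ∧ (initTM l s).1.getD p none = some 0
         ∧ (initTM l s).2.getD p none = some x.2) := by
  induction l with
  | nil => intro s _ _ _ p; exact Or.inl ⟨by simp, rfl, rfl⟩
  | cons x l' ih =>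
    intro s hx hl1 hl2 p
    have hxr : PySem.Raise.InRange n x.2 := hx x (by simp)
    have hs1 : PySem.List.pySetD s.1 x.2 (some (0:Int)) = s.1.set (pnorm n x.2) (some 0) := by
      rw [pySetD_pnorm _ (by rw [hl1]; exact hxr), hl1]
    have hs2 : PySem.List.pySetD s.2 x.2 (some x.2) = s.2.set (pnorm n x.2) (some x.2) := by
      rw [pySetD_pnorm _ (by rw [hl2]; exact hxr), hl2]
    have hstep : initTM (x :: l') s =
        initTM l' (s.1.set (pnorm n x.2) (some 0), s.2.set (pnorm n x.2) (some x.2)) := by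
      simp only [initTM]; rw [hs1, hs2]
    rw [hstep]
    have hrec := ih (s.1.set (pnorm n x.2) (some 0), s.2.set (pnorm n x.2) (some x.2))
      (fun y hy => hx y (by simp [hy])) (by simpa using hl1) (by simpa using hl2) p
    rcases hrec with ⟨hne, h1, h2⟩ | ⟨y, hy, hp, h1, h2⟩
    · simp only at h1 h2
      by_cases hpx : pnorm n x.2 = p
      · subst hpx
        refine Or.inr ⟨x, by simp, rfl, ?_, ?_⟩
        · rw [h1, getD_set_self _ _ _ _ (by rw [hl1]; exact pnorm_lt hxr)]
        · rw [h2, getD_set_self _ _ _ _ (by rw [hl2]; exact pnorm_lt hxr)]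
      · refine Or.inl ⟨?_, ?_, ?_⟩
        · intro y hy
          rcases List.mem_cons.mp hy with rfl | hy'
          · exact hpx
          · exact hne y hy'
        · rw [h1, getD_set_ne _ _ _ (fun h => hpx h.symm)]
        · rw [h2, getD_set_ne _ _ _ (fun h => hpx h.symm)]
    · exact Or.inr ⟨y, by simp [hy], hp, h1, h2⟩

theorem initIdx_isSome (l : List (Int × Int)) :
    ∀ (d : PySem.Dict Int Int) (m : Int),
    (m ∈ l.map (·.2) ∨ (d.get? m).isSome) → ((initIdx l d).get? m).isSome := by
  induction l with
  | nil =>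
    intro d m h
    rcases h with h | h
    · simp at h
    · simpa [initIdx] using h
  | cons x l' ih =>
    intro d m h
    simp only [initIdx]
    apply ih
    rcases h with h | h
    · simp only [List.map_cons, List.mem_cons] at h
      rcases h with h | h
      · right
        rw [PySem.Dict.get?_insert]
        simp [h]
      · left; exact h
    · right
      rw [PySem.Dict.get?_insert]
      split
      · simp
      · exact h

theorem initIdx_spec (T : List Int) (l : List (Int × Int)) :
    ∀ (d : PySem.Dict Int Int),
    (∀ m j, d.get? m = some j → ∃ jn : Nat, j = (jn:Int) ∧ jn < T.length ∧ T[jn]? = some m) →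
    (∀ x ∈ l, ∃ jn : Nat, x.1 = (jn:Int) ∧ jn < T.length ∧ T[jn]? = some x.2) →
    ∀ m j, (initIdx l d).get? m = some j →
      ∃ jn : Nat, j = (jn:Int) ∧ jn < T.length ∧ T[jn]? = some m := by
  induction l with
  | nil => intro d hd _ m j h; exact hd m j h
  | cons x l' ih =>
    intro d hd hl m j h
    simp only [initIdx] at h
    refine ih (d.insert x.2 x.1) ?_ (fun y hy => hl y (by simp [hy])) m j h
    intro m' j' h'
    rw [PySem.Dict.get?_insert] at h'
    split at h'
    · next heq =>
      cases h'
      obtain ⟨jn, hj, hlt, hT⟩ := hl x (by simp)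
      exact ⟨jn, hj, hlt, by rw [heq]; exact hT⟩
    · exact hd m' j' h'

theorem enumerate_mem_spec (T : List Int) :
    ∀ x ∈ PySem.List.enumerate T 0, ∃ jn : Nat, x.1 = (jn:Int) ∧ jn < T.length ∧ T[jn]? = some x.2 := by
  intro x hx
  rw [PySem.List.enumerate_eq_map_pyRange (d := 0)] at hx
  obtain ⟨j, hj, rfl⟩ := List.mem_map.mp hx
  rw [PySem.List.mem_pyRange_one] at hj
  simp only [PySem.List.len_eq] at hj
  refine ⟨j.toNat, by omega, by omega, ?_⟩
  show T[j.toNat]? = some (PySem.List.pyGetD T j 0)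
  rw [pyGetD_pnorm 0 (by unfold PySem.Raise.InRange; omega)]
  unfold pnorm
  rw [if_neg (by omega), List.getD_eq_getElem?_getD, List.getElem?_eq_getElem (by omega),
      Option.getD_some]

-- ---------- processing one queue entry in A ----------
theorem klt_irrefl (a : Option (Int × Int)) : kltB a a = false := by
  rcases a with _ | ⟨a1, a2⟩ <;> simp [kltB] <;> omega

theorem kAt_congr {idx : PySem.Dict Int Int}
    {s s' : List (Option Int) × List (Option Int)} {p : Nat}
    (h1 : s'.1.getD p none = s.1.getD p none) (h2 : s'.2.getD p none = s.2.getD p none) :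
    kAt idx s' p = kAt idx s p := by
  unfold kAt; rw [h1, h2]

theorem reach_time_isSome {G : List (List Int)} {idx : PySem.Dict Int Int}
    {s0 s : List (Option Int) × List (Option Int)} (h : ReachR G idx s0 s) {r : Nat}
    (hs : (s0.1.getD r none).isSome) : (s.1.getD r none).isSome := by
  induction h with
  | refl => exact hs
  | step hr he ih => exact rstep_time_isSome _ _ _ _ ih

theorem kle_some_ne_none {a : Option (Int × Int)} {b : Int × Int}
    (h : kleB a (some b) = true) : a ≠ none := by
  cases a
  · simp [kleB] at h
  · simp

theorem rstep_kle (idx : PySem.Dict Int Int) (p q : Nat)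
    (s : List (Option Int) × List (Option Int)) (hq1 : q < s.1.length) (hq2 : q < s.2.length) :
    ∀ r, kleB (kAt idx (rstep idx p q s) r) (kAt idx s r) = true := by
  intro r
  by_cases hrq : r = q
  · subst hrq
    rw [rstep_kAt_self idx p r s hq1 hq2]
    split
    · next hc => exact klt_kle hc
    · exact kle_refl _
  · rw [rstep_kAt_other idx p q s hrq]
    exact kle_refl _

theorem rowA {G : List (List Int)} {idx : PySem.Dict Int Int} {T : List Int}
    (hio : IdxSpec idx T) (hK : 0 < T.length)
    {u : Int} (hu : PySem.Raise.InRange G.length u) {tp : Int} :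
    ∀ (rest : List Int),
    (∀ v ∈ rest, EdgeOf G (pnorm G.length u) (pnorm G.length v) ∧
      PySem.Raise.InRange G.length v) →
    ∀ (s : List (Option Int) × List (Option Int)) (Qa : List Int),
    GInv idx G.length s →
    s.1.getD (pnorm G.length u) none = some tp →
    ∃ s' app,
      rest.foldl (aRelax idx u (tp+1)) (s.1, s.2, Qa) = (s'.1, s'.2, Qa ++ app) ∧
      ReachR G idx s s' ∧ GInv idx G.length s' ∧
      (∀ y : Nat, kAt idx s' y ≠ kAt idx s y → ∃ v ∈ app, pnorm G.length v = y) ∧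
      (∀ v ∈ app, v ∈ rest) ∧
      phi idx G.length T.length s' + app.length ≤ phi idx G.length T.length s ∧
      (∀ r, kleB (kAt idx s' r) (kAt idx s r) = true) ∧
      s'.1.getD (pnorm G.length u) none = some tp ∧
      s'.2.getD (pnorm G.length u) none = s.2.getD (pnorm G.length u) none ∧
      (∀ v ∈ rest, kltB (kbump (kAt idx s' (pnorm G.length u)))
        (kAt idx s' (pnorm G.length v)) = false) := by
  intro rest
  induction rest with
  | nil =>
    intro _ s Qa hg hp
    exact ⟨s, [], by simp, ReachR.refl, hg, fun y hy => absurd rfl hy,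
      by simp, by simp, fun r => kle_refl _, hp, rfl, by simp⟩
  | cons v rest' ih =>
    intro hrest s Qa hg hp
    obtain ⟨hedge, hv⟩ := hrest v (by simp)
    have hq : pnorm G.length v < G.length := hedge.2.1
    set p := pnorm G.length u with hpdef
    set q := pnorm G.length v with hqdef
    have hstep := aRelax_eq_rstep (n := G.length) (idx := idx) (Q := Qa) (s := s)
      hu hv hg.1 hg.2.1 hp rfl
    set s1 := rstep idx p q s with hs1def
    have hg1 : GInv idx G.length s1 := GInv_rstep p hg hq
    have hsrc1 := rstep_src idx p q s
    have hp1 : s1.1.getD p none = some tp := by rw [hsrc1.1, hp]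
    have hkle1 : ∀ r, kleB (kAt idx s1 r) (kAt idx s r) = true :=
      rstep_kle idx p q s (by rw [hg.1]; omega) (by rw [hg.2.1]; omega)
    obtain ⟨s', app', hfold, hreach, hg', hchg, happ, hphi, hkle, hsrc't, hsrc'm, hstab⟩ :=
      ih (fun w hw => hrest w (by simp [hw])) s1 (Qa ++ (if kltB (kbump (kAt idx s p))
        (kAt idx s q) = true then [v] else [])) hg1 hp1
    refine ⟨s', (if kltB (kbump (kAt idx s p)) (kAt idx s q) = true then [v] else []) ++ app',
      ?_, ?_, hg', ?_, ?_, ?_, ?_, ?_, ?_, ?_⟩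
    · rw [List.foldl_cons, hstep, hfold, List.append_assoc]
    · exact reach_trans (ReachR.step ReachR.refl hedge) hreach
    · intro y hy
      by_cases h1 : kAt idx s' y = kAt idx s1 y
      · rw [h1] at hy
        have hyq : y = q := by
          by_contra hne
          exact hy (rstep_kAt_other idx p q s hne)
        subst hyq
        have hc : kltB (kbump (kAt idx s p)) (kAt idx s q) = true := by
          by_contra hcf
          exact hy (by rw [hs1def, rstep_of_not_klt (Bool.not_eq_true _ ▸ hcf)])
        exact ⟨v, by simp [hc], rfl⟩
      · obtain ⟨w, hw, hwp⟩ := hchg y h1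
        exact ⟨w, by simp [hw], hwp⟩
    · intro w hw
      rcases List.mem_append.mp hw with hw | hw
      · split at hw
        · simp at hw; simp [hw]
        · simp at hw
      · simp [happ w hw]
    · by_cases hc : kltB (kbump (kAt idx s p)) (kAt idx s q) = true
      · have hlt := phi_rstep_lt p hg hio hK hq hc
        rw [← hs1def] at hlt
        simp only [hc, if_pos] at *
        simp only [List.length_append, List.length_cons, List.length_nil]
        omega
      · have heq : s1 = s := by rw [hs1def, rstep_of_not_klt (Bool.not_eq_true _ ▸ hc)]
        rw [heq] at hphi
        simp only [hc, if_neg, Bool.not_eq_true] at *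
        simp only [List.length_append, List.length_nil]
        omega
    · exact fun r => kle_trans (hkle r) (hkle1 r)
    · rw [hsrc't]
    · rw [hsrc'm, hsrc1.2]
    · intro w hw
      have hksrc' : kAt idx s' p = kAt idx s1 p := kAt_congr (by rw [hsrc't, hp1]) hsrc'm
      rcases List.mem_cons.mp hw with rfl | hw'
      · -- the head edge: not improving right after its own relaxation, stays so
        have hns1 : kltB (kbump (kAt idx s1 p)) (kAt idx s1 q) = false := by
          have hself := rstep_kAt_self idx p q s (by rw [hg.1]; omega) (by rw [hg.2.1]; omega)
          have hsrck : kAt idx s1 p = kAt idx s p := kAt_congr hsrc1.1 hsrc1.2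
          rw [hsrck, hself]
          split
          · exact klt_irrefl _
          · next hcf => exact Bool.not_eq_true _ ▸ hcf
        by_contra hcf
        have hcf' : kltB (kbump (kAt idx s' p)) (kAt idx s' q) = true :=
          Bool.not_eq_false _ ▸ hcf
        have := klt_of_klt_of_kle hcf' (hkle q)
        rw [hksrc'] at this
        rw [hns1] at this
        cases this
      · exact hstab w hw'

-- ---------- the whole queue loop of A ----------
theorem aLoop_ok {G : List (List Int)} {idx : PySem.Dict Int Int} {T : List Int}
    (hio : IdxSpec idx T) (hK : 0 < T.length)
    (hG : ∀ row ∈ G, ∀ v ∈ row, PySem.Raise.InRange G.length v) :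
    ∀ (fuel : Nat) (s : List (Option Int) × List (Option Int)) (Q : List Int),
    GInv idx G.length s →
    (∀ u ∈ Q, PySem.Raise.InRange G.length u ∧
      (s.1.getD (pnorm G.length u) none).isSome) →
    (∀ p q, EdgeOf G p q → kltB (kbump (kAt idx s p)) (kAt idx s q) = true →
      ∃ u ∈ Q, pnorm G.length u = p) →
    phi idx G.length T.length s + Q.length ≤ fuel →
    ∃ s', aLoop G idx fuel (s.1, s.2, Q) = (s'.1, s'.2) ∧
      ReachR G idx s s' ∧ GInv idx G.length s' ∧ StableK G idx s' := by
  intro fuel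
  induction fuel with
  | zero =>
    intro s Q hg hmem hcov hfuel
    have hQ : Q = [] := List.eq_nil_of_length_eq_zero (by omega)
    subst hQ
    refine ⟨s, rfl, ReachR.refl, hg, ?_⟩
    intro p q he
    by_contra hc
    obtain ⟨u', hu', _⟩ := hcov p q he (Bool.not_eq_false _ ▸ hc)
    simp at hu'
  | succ fuel ih =>
    intro s Q hg hmem hcov hfuel
    cases Q with
    | nil =>
      refine ⟨s, rfl, ReachR.refl, hg, ?_⟩
      intro p q he
      by_contra hc
      obtain ⟨u', hu', _⟩ := hcov p q he (Bool.not_eq_false _ ▸ hc)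
      simp at hu'
    | cons u Q' =>
      obtain ⟨hu, hsome⟩ := hmem u (by simp)
      set p := pnorm G.length u with hpdef
      have hplt : p < G.length := pnorm_lt hu
      obtain ⟨tp, htp⟩ : ∃ tp, s.1.getD p none = some tp := by
        cases hx : s.1.getD p none
        · rw [hx] at hsome; cases hsome
        · exact ⟨_, rfl⟩
      have htguard : (PySem.List.pyGetD s.1 u none).getD 0 + 1 = tp + 1 := by
        rw [pyGetD_pnorm _ (by rw [hg.1]; exact hu), hg.1, ← hpdef, htp, Option.getD_some]
      have hrow : PySem.List.pyGetD G u [] = G[p] := by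
        rw [pyGetD_pnorm _ hu]
        rw [List.getD_eq_getElem?_getD, List.getElem?_eq_getElem hplt, Option.getD_some]
      obtain ⟨s', app, hfold, hreach, hg', hchg, happ, hphi, hkle, hsrct, hsrcm, hstab⟩ :=
        rowA hio hK hu (tp := tp) G[p]
          (fun v hv => ⟨⟨hplt, pnorm_lt (hG _ (List.getElem_mem hplt) v hv), v, hv, rfl⟩,
            hG _ (List.getElem_mem hplt) v hv⟩)
          s Q' hg htp
      have hloopstep : aLoop G idx (fuel+1) (s.1, s.2, u :: Q') =
          aLoop G idx fuel ((G[p] : List Int).foldl (aRelax idx u (tp+1)) (s.1, s.2, Q')) := by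
        simp only [aLoop]
        rw [htguard, hrow]
      obtain ⟨s'', hrun, hreach', hg'', hstab''⟩ := ih s' (Q' ++ app) hg'
        (by
          intro w hw
          rcases List.mem_append.mp hw with hw | hw
          · obtain ⟨h1, h2⟩ := hmem w (by simp [hw])
            exact ⟨h1, reach_time_isSome hreach h2⟩
          · have hwrow := happ w hw
            refine ⟨hG _ (List.getElem_mem hplt) w hwrow, ?_⟩
            have hns := hstab w hwrow
            have hksrc : kAt idx s' p = some (tp, idx.getD ((s'.2.getD p none).getD 0) 0) := by
              unfold kAt; rw [hsrct]; rfl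
            rw [hksrc] at hns
            have hle := not_klt_iff_kle.mp hns
            have hne := kle_some_ne_none hle
            rw [Ne, kAt_none_iff] at hne
            cases hx : s'.1.getD (pnorm G.length w) none
            · exact absurd hx hne
            · rfl)
        (by
          intro x y he himp
          by_cases hx : kAt idx s' x = kAt idx s x
          · have himp0 : kltB (kbump (kAt idx s x)) (kAt idx s y) = true := by
              rw [← hx]
              exact klt_of_klt_of_kle himp (hkle y)
            obtain ⟨u', hu', hpu'⟩ := hcov x y he himp0
            rcases List.mem_cons.mp hu' with rfl | hu''
            · exfalso
              rw [← hpdef] at hpu'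
              subst hpu'
              obtain ⟨hplt', _, v, hv, rfl⟩ := he
              have := hstab v hv
              rw [this] at himp
              cases himp
            · exact ⟨u', by simp [hu''], hpu'⟩
          · obtain ⟨w, hw, hwp⟩ := hchg x hx
            exact ⟨w, by simp [hw], hwp⟩)
        (by
          simp only [List.length_append]
          simp only [List.length_cons] at hfuel
          omega)
      refine ⟨s'', ?_, reach_trans hreach hreach', hg'', hstab''⟩
      rw [hloopstep, hfold, hrun]

-- ---------- one sweep of B ----------
theorem rowB {G : List (List Int)} {idx : PySem.Dict Int Int} {T : List Int}
    (hio : IdxSpec idx T) (hK : 0 < T.length)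
    {u : Int} (hu : PySem.Raise.InRange G.length u) {tp : Int} :
    ∀ (rest : List Int),
    (∀ v ∈ rest, EdgeOf G (pnorm G.length u) (pnorm G.length v) ∧
      PySem.Raise.InRange G.length v) →
    ∀ (s : List (Option Int) × List (Option Int)) (c : Bool),
    GInv idx G.length s →
    s.1.getD (pnorm G.length u) none = some tp →
    ∃ s' ch,
      rest.foldl (bRelax idx u (tp+1)) (s.1, s.2, c) = (s'.1, s'.2, c || ch) ∧
      ReachR G idx s s' ∧ GInv idx G.length s' ∧
      phi idx G.length T.length s' ≤ phi idx G.length T.length s ∧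
      (ch = true → phi idx G.length T.length s' < phi idx G.length T.length s) ∧
      (ch = false → s' = s ∧ ∀ v ∈ rest, kltB (kbump (kAt idx s (pnorm G.length u)))
        (kAt idx s (pnorm G.length v)) = false) ∧
      s'.1.getD (pnorm G.length u) none = some tp := by
  intro rest
  induction rest with
  | nil =>
    intro _ s c hg hp
    exact ⟨s, false, by simp, ReachR.refl, hg, le_refl _, by simp, fun _ => ⟨rfl, by simp⟩, hp⟩
  | cons v rest' ih =>
    intro hrest s c hg hp
    obtain ⟨hedge, hv⟩ := hrest v (by simp)
    have hq : pnorm G.length v < G.length := hedge.2.1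
    set p := pnorm G.length u with hpdef
    set q := pnorm G.length v with hqdef
    have hstep := bRelax_eq_rstep (n := G.length) (idx := idx) (c := c) (s := s)
      hu hv hg.1 hg.2.1 hp rfl
    set c0 := kltB (kbump (kAt idx s p)) (kAt idx s q) with hc0def
    set s1 := rstep idx p q s with hs1def
    have hg1 : GInv idx G.length s1 := GInv_rstep p hg hq
    have hsrc1 := rstep_src idx p q s
    have hp1 : s1.1.getD p none = some tp := by rw [hsrc1.1, hp]
    obtain ⟨s', ch', hfold, hreach, hg', hphile, hphilt, hstable, hsrc⟩ :=
      ih (fun w hw => hrest w (by simp [hw])) s1 (c || c0) hg1 hp1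
    refine ⟨s', c0 || ch', ?_, reach_trans (ReachR.step ReachR.refl hedge) hreach, hg',
      ?_, ?_, ?_, hsrc⟩
    · rw [List.foldl_cons, hstep, hfold, Bool.or_assoc]
    · refine le_trans hphile ?_
      rw [hs1def]
      exact phi_rstep_le p hg hio hK hq
    · intro hch
      rcases Bool.or_eq_true_iff.mp hch with hc0 | hch'
      · have := phi_rstep_lt p hg hio hK hq (hc0def ▸ hc0)
        rw [← hs1def] at this
        omega
      · have hlt := hphilt hch'
        have hle : phi idx G.length T.length s1 ≤ phi idx G.length T.length s := by
          rw [hs1def]; exact phi_rstep_le p hg hio hK hq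
        omega
    · intro hch
      have hc0f : c0 = false := by
        cases hc0 : c0
        · rfl
        · rw [hc0] at hch; simp at hch
      have hch' : ch' = false := by
        cases hc : ch'
        · rfl
        · rw [hc] at hch; simp at hch
      have hs1eq : s1 = s := by
        rw [hs1def]
        exact rstep_of_not_klt (hc0def ▸ hc0f)
      obtain ⟨hseq, hstab'⟩ := hstable hch'
      rw [hs1eq] at hseq hstab'
      refine ⟨hseq, ?_⟩
      intro w hw
      rcases List.mem_cons.mp hw with rfl | hw'
      · exact hc0def ▸ hc0f
      · exact hstab' w hw'

theorem passAux {G : List (List Int)} {idx : PySem.Dict Int Int} {T : List Int}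
    (hio : IdxSpec idx T) (hK : 0 < T.length)
    (hG : ∀ row ∈ G, ∀ v ∈ row, PySem.Raise.InRange G.length v) :
    ∀ (l : List Int), (∀ j ∈ l, 0 ≤ j ∧ j < (G.length:Int)) →
    ∀ (s : List (Option Int) × List (Option Int)) (c : Bool),
    GInv idx G.length s →
    ∃ s' ch,
      l.foldl (fun st u =>
        match PySem.List.pyGetD st.2.1 u none with
        | none => st
        | some _ =>
          (PySem.List.pyGetD G u []).foldl
            (bRelax idx u ((PySem.List.pyGetD st.1 u none).getD 0 + 1)) st) (s.1, s.2, c)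
        = (s'.1, s'.2, c || ch) ∧
      ReachR G idx s s' ∧ GInv idx G.length s' ∧
      phi idx G.length T.length s' ≤ phi idx G.length T.length s ∧
      (ch = true → phi idx G.length T.length s' < phi idx G.length T.length s) ∧
      (ch = false → s' = s ∧ ∀ j ∈ l, ∀ q : Nat,
        kltB (kbump (kAt idx s j.toNat)) (kAt idx s q) = false ∨
        ¬ EdgeOf G j.toNat q) := by
  intro l
  induction l with
  | nil =>
    intro _ s c hg
    exact ⟨s, false, by simp, ReachR.refl, hg, le_refl _, by simp, fun _ => ⟨rfl, by simp⟩⟩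
  | cons j l' ih =>
    intro hl s c hg
    obtain ⟨hj0, hjn⟩ := hl j (by simp)
    have hjr : PySem.Raise.InRange G.length j := ⟨by omega, hjn⟩
    have hpj : pnorm G.length j = j.toNat := by unfold pnorm; rw [if_neg (by omega)]
    have hmarkread : PySem.List.pyGetD s.2 j none = s.2.getD j.toNat none := by
      rw [pyGetD_pnorm _ (by rw [hg.2.1]; exact hjr), hg.2.1, hpj]
    rw [List.foldl_cons]
    cases hmk : s.2.getD j.toNat none with
    | none =>
      -- node not reached yet: skipped, and it cannot improve anything
      have hskip : (match PySem.List.pyGetD s.2 j none with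
          | none => (s.1, s.2, c)
          | some _ =>
            (PySem.List.pyGetD G j []).foldl
              (bRelax idx j ((PySem.List.pyGetD s.1 j none).getD 0 + 1)) (s.1, s.2, c))
          = (s.1, s.2, c) := by rw [hmarkread, hmk]
      rw [hskip]
      obtain ⟨s', ch, hfold, hreach, hg', hle, hlt, hstab⟩ :=
        ih (fun w hw => hl w (by simp [hw])) s c hg
      refine ⟨s', ch, hfold, hreach, hg', hle, hlt, ?_⟩
      intro hch
      obtain ⟨hseq, hstab'⟩ := hstab hch
      refine ⟨hseq, ?_⟩
      intro w hw q
      rcases List.mem_cons.mp hw with rfl | hw'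
      · left
        have htnone : s.1.getD w.toNat none = none := (hg.2.2.1 w.toNat).1.mpr hmk
        have : kAt idx s w.toNat = none := kAt_none_iff.mpr htnone
        rw [this]
        simp [kbump, kltB]
      · exact hstab' w hw' q
    | some m =>
      have htsome : ∃ tp, s.1.getD j.toNat none = some tp := by
        cases hx : s.1.getD j.toNat none
        · have := (hg.2.2.1 j.toNat).1.mp hx
          rw [this] at hmk; cases hmk
        · exact ⟨_, rfl⟩
      obtain ⟨tp, htp⟩ := htsome
      have htguard : (PySem.List.pyGetD s.1 j none).getD 0 + 1 = tp + 1 := by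
        rw [pyGetD_pnorm _ (by rw [hg.1]; exact hjr), hg.1, hpj, htp, Option.getD_some]
      have hjlt : j.toNat < G.length := by omega
      have hrow : PySem.List.pyGetD G j [] = G[j.toNat] := by
        rw [pyGetD_pnorm _ hjr, hpj]
        rw [List.getD_eq_getElem?_getD, List.getElem?_eq_getElem hjlt, Option.getD_some]
      have hstep : (match PySem.List.pyGetD s.2 j none with
          | none => (s.1, s.2, c)
          | some _ =>
            (PySem.List.pyGetD G j []).foldl
              (bRelax idx j ((PySem.List.pyGetD s.1 j none).getD 0 + 1)) (s.1, s.2, c))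
          = (G[j.toNat] : List Int).foldl (bRelax idx j (tp+1)) (s.1, s.2, c) := by
        rw [hmarkread, hmk, htguard, hrow]
      rw [hstep]
      obtain ⟨s1, ch0, hfold0, hreach0, hg0, hle0, hlt0, hstab0, hsrc0⟩ :=
        rowB hio hK hjr (tp := tp) G[j.toNat]
          (fun v hv => ⟨by
            rw [hpj]
            exact ⟨hjlt, pnorm_lt (hG _ (List.getElem_mem hjlt) v hv), v, hv, rfl⟩,
            hG _ (List.getElem_mem hjlt) v hv⟩)
          s c hg (by rw [hpj]; exact htp)
      rw [hfold0]
      obtain ⟨s', ch', hfold, hreach, hg', hle, hlt, hstab⟩ :=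
        ih (fun w hw => hl w (by simp [hw])) s1 (c || ch0) hg0
      refine ⟨s', ch0 || ch', ?_, reach_trans hreach0 hreach, hg', le_trans hle hle0, ?_, ?_⟩
      · rw [hfold, Bool.or_assoc]
      · intro hch
        rcases Bool.or_eq_true_iff.mp hch with h | h
        · have := hlt0 h
          omega
        · have := hlt h
          omega
      · intro hch
        have hc0f : ch0 = false := by
          cases hx : ch0
          · rfl
          · rw [hx] at hch; simp at hch
        have hch' : ch' = false := by
          cases hx : ch'
          · rfl
          · rw [hx] at hch; simp at hch
        obtain ⟨hseq1, hstab1⟩ := hstab0 hc0f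
        obtain ⟨hseq, hstab'⟩ := hstab hch'
        rw [hseq1] at hseq hstab'
        refine ⟨hseq, ?_⟩
        intro w hw q
        rcases List.mem_cons.mp hw with rfl | hw'
        · by_cases hE : EdgeOf G w.toNat q
          · left
            obtain ⟨hwlt, hqlt, v, hv, rfl⟩ := hE
            have := hstab1 v hv
            rw [hpj] at this
            exact this
          · right; exact hE
        · exact hstab' w hw' q

-- ---------- the whole sweep loop of B ----------
theorem bLoop_ok {G : List (List Int)} {idx : PySem.Dict Int Int} {T : List Int}
    (hio : IdxSpec idx T) (hK : 0 < T.length)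
    (hG : ∀ row ∈ G, ∀ v ∈ row, PySem.Raise.InRange G.length v) :
    ∀ (fuel : Nat) (s : List (Option Int) × List (Option Int)),
    GInv idx G.length s →
    phi idx G.length T.length s + 1 ≤ fuel →
    ∃ s', bLoop G idx G.length fuel s = s' ∧
      ReachR G idx s s' ∧ GInv idx G.length s' ∧ StableK G idx s' := by
  intro fuel
  induction fuel with
  | zero => intro s _ hfuel; omega
  | succ fuel ih =>
    intro s hg hfuel
    have hrange : ∀ j ∈ PySem.List.pyRange 0 (G.length : Int) 1, 0 ≤ j ∧ j < (G.length : Int) := by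
      intro j hj
      rw [PySem.List.mem_pyRange_one] at hj
      exact hj
    obtain ⟨s1, ch, hfold, hreach, hg1, hle, hlt, hstab⟩ :=
      passAux hio hK hG (PySem.List.pyRange 0 (G.length : Int) 1) hrange s false hg
    have hpass : bPass G idx G.length s = ((s1.1, s1.2), false || ch) := by
      unfold bPass
      rw [hfold]
    cases hch : ch with
    | false =>
      obtain ⟨hseq, hstab'⟩ := hstab hch
      refine ⟨s1, ?_, hseq ▸ ReachR.refl, hg1, ?_⟩
      · simp only [bLoop, hpass, hch]
        simp
      · intro p q he
        have hpmem : (p : Int) ∈ PySem.List.pyRange 0 (G.length : Int) 1 := by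
          rw [PySem.List.mem_pyRange_one]
          obtain ⟨hplt, _, _, _, _⟩ := he
          omega
        have := hstab' (p : Int) hpmem q
        rcases this with h | h
        · rw [hseq]
          simpa using h
        · exact absurd he h
    | true =>
      have hlt' := hlt hch
      obtain ⟨s', hrun, hreach', hg', hstab''⟩ := ih s1 hg1 (by omega)
      refine ⟨s', ?_, reach_trans hreach hreach', hg', hstab''⟩
      simp only [bLoop, hpass, hch]
      simpa using hrun

-- ---------- from equal keys to equal mark lists ----------
theorem getD_replicate (n p : Nat) :
    (List.replicate n (none : Option Int)).getD p none = none := by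
  rw [List.getD_eq_getElem?_getD]
  by_cases hp : p < n
  · rw [List.getElem?_eq_getElem (by simpa using hp)]
    simp
  · rw [List.getElem?_eq_none (by simpa using hp)]
    rfl

theorem marks_eq {G : List (List Int)} {idx : PySem.Dict Int Int} {T : List Int}
    {σ τ : List (Option Int) × List (Option Int)}
    (hio : IdxSpec idx T) (hgσ : GInv idx G.length σ) (hgτ : GInv idx G.length τ)
    (hk : ∀ r, kAt idx σ r = kAt idx τ r) : σ.2 = τ.2 := by
  apply List.ext_getElem (by rw [hgσ.2.1, hgτ.2.1])
  intro p hp1 hp2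
  have hgd1 : σ.2[p] = σ.2.getD p none := by
    rw [List.getD_eq_getElem?_getD, List.getElem?_eq_getElem hp1, Option.getD_some]
  have hgd2 : τ.2[p] = τ.2.getD p none := by
    rw [List.getD_eq_getElem?_getD, List.getElem?_eq_getElem hp2, Option.getD_some]
  rw [hgd1, hgd2]
  have hkp := hk p
  cases hσt : σ.1.getD p none with
  | none =>
    have hτk : kAt idx τ p = none := by rw [← hkp]; exact kAt_none_iff.mpr hσt
    have hτt := kAt_none_iff.mp hτk
    rw [(hgσ.2.2.1 p).1.mp hσt, (hgτ.2.2.1 p).1.mp hτt]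
  | some t =>
    cases hσm : σ.2.getD p none with
    | none =>
      have := (hgσ.2.2.1 p).1.mpr hσm
      rw [this] at hσt; cases hσt
    | some m =>
      cases hτt : τ.1.getD p none with
      | none =>
        have hσk : kAt idx σ p = none := by rw [hkp]; exact kAt_none_iff.mpr hτt
        rw [kAt_none_iff] at hσk
        rw [hσk] at hσt; cases hσt
      | some t' =>
        cases hτm : τ.2.getD p none with
        | none =>
          have := (hgτ.2.2.1 p).1.mpr hτm
          rw [this] at hτt; cases hτt
        | some m' =>
          -- equal keys force equal source indices hence equal marks
          have hσs := (hgσ.2.2.1 p).2 m hσm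
          have hτs := (hgτ.2.2.1 p).2 m' hτm
          obtain ⟨j, hj⟩ := Option.isSome_iff_exists.mp hσs
          obtain ⟨j', hj'⟩ := Option.isSome_iff_exists.mp hτs
          have hσk : kAt idx σ p = some (t, j) := by
            unfold kAt
            rw [hσt, hσm]
            simp [PySem.Dict.getD_of_get?_eq_some idx 0 hj]
          have hτk : kAt idx τ p = some (t', j') := by
            unfold kAt
            rw [hτt, hτm]
            simp [PySem.Dict.getD_of_get?_eq_some idx 0 hj']
          rw [hσk, hτk] at hkp
          obtain ⟨hteq, hjeq⟩ : t = t' ∧ j = j' := by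
            constructor <;> (cases hkp; rfl)
          obtain ⟨jn, rfl, hlt, hTj⟩ := hio m j hj
          obtain ⟨jn', hjn', hlt', hTj'⟩ := hio m' j' hj'
          have : jn = jn' := by omega
          subst this
          rw [hTj] at hTj'
          cases hTj'
          rfl

theorem count_folds_eq (lm : List (Option Int)) (x : Int) :
    ∀ c : Int, lm.foldl (fun cnt m => if m == some x then cnt + 1 else cnt) c
      = lm.foldl (fun cnt m => cnt + (if m == some x then 1 else 0)) c := by
  induction lm with
  | nil => intro c; rfl
  | cons m lm' ih =>
    intro c
    simp only [List.foldl_cons]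
    by_cases hm : m == some x
    · rw [if_pos hm, if_pos hm, ih]
    · rw [if_neg hm, if_neg hm, ih]
      norm_num

-- ===== VERDICT (by name: the statement is the Claim_ definition above) =====
theorem pyfold_enum {α : Type} (T : List Int) (g : α → (Int × Int) → α) (init : α) :
    List.foldl (fun st i => g st (i, PySem.List.pyGetD T i 0)) init
      (PySem.List.pyRange 0 (PySem.List.len T) 1)
    = List.foldl g init (PySem.List.enumerate T 0) := by
  rw [PySem.List.enumerate_eq_map_pyRange (d := 0), List.foldl_map]

-- ===== VERDICT (by name: the statement is the Claim_ definition above) =====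
theorem mykoryza_spec : Claim_equal_mykoryza := by
  intro G T d _ hpre
  unfold Spec_mykoryza
  obtain ⟨hT, hd, hTr, hG⟩ := hpre
  unfold mykoryza mykoryza_alt
  dsimp only
  have hA : List.foldl
      (fun st i =>
        (PySem.List.pySetD st.1 (PySem.List.pyGetD T i 0) (some 0),
          PySem.List.pySetD st.2.1 (PySem.List.pyGetD T i 0) (some (PySem.List.pyGetD T i 0)),
          st.2.2.1.insert (PySem.List.pyGetD T i 0) i, st.2.2.2 ++ [PySem.List.pyGetD T i 0]))
      (List.replicate G.length (none : Option Int), List.replicate G.length (none : Option Int),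
        (PySem.Dict.empty : PySem.Dict Int Int), ([] : List Int))
      (PySem.List.pyRange 0 (PySem.List.len T) 1)
      = ((initTM (PySem.List.enumerate T 0)
            (List.replicate G.length none, List.replicate G.length none)).1,
         (initTM (PySem.List.enumerate T 0)
            (List.replicate G.length none, List.replicate G.length none)).2,
         initIdx (PySem.List.enumerate T 0) PySem.Dict.empty, T) := by
    have h1 := pyfold_enum T (fun st (x : Int × Int) =>
      (PySem.List.pySetD st.1 x.2 (some (0:Int)),
       PySem.List.pySetD st.2.1 x.2 (some x.2),
       st.2.2.1.insert x.2 x.1,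
       st.2.2.2 ++ [x.2]))
      (List.replicate G.length (none : Option Int), List.replicate G.length (none : Option Int),
        (PySem.Dict.empty : PySem.Dict Int Int), ([] : List Int))
    refine h1.trans ?_
    have h2 := aInit_fold_eq (PySem.List.enumerate T 0)
      (List.replicate G.length (none : Option Int), List.replicate G.length (none : Option Int))
      PySem.Dict.empty []
    simp only [List.nil_append] at h2
    rw [h2, PySem.List.map_snd_enumerate]
  have hB : List.foldl
      (fun st i =>
        (PySem.List.pySetD st.1 (PySem.List.pyGetD T i 0) (some 0),
          PySem.List.pySetD st.2.1 (PySem.List.pyGetD T i 0) (some (PySem.List.pyGetD T i 0)),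
          st.2.2.insert (PySem.List.pyGetD T i 0) i))
      (List.replicate G.length (none : Option Int), List.replicate G.length (none : Option Int),
        (PySem.Dict.empty : PySem.Dict Int Int))
      (PySem.List.pyRange 0 (PySem.List.len T) 1)
      = ((initTM (PySem.List.enumerate T 0)
            (List.replicate G.length none, List.replicate G.length none)).1,
         (initTM (PySem.List.enumerate T 0)
            (List.replicate G.length none, List.replicate G.length none)).2,
         initIdx (PySem.List.enumerate T 0) PySem.Dict.empty) := by
    have h1 := pyfold_enum T (fun st (x : Int × Int) =>
      (PySem.List.pySetD st.1 x.2 (some (0:Int)),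
       PySem.List.pySetD st.2.1 x.2 (some x.2),
       st.2.2.insert x.2 x.1))
      (List.replicate G.length (none : Option Int), List.replicate G.length (none : Option Int),
        (PySem.Dict.empty : PySem.Dict Int Int))
    refine h1.trans ?_
    exact bInit_fold_eq (PySem.List.enumerate T 0)
      (List.replicate G.length (none : Option Int), List.replicate G.length (none : Option Int))
      PySem.Dict.empty
  rw [hA, hB]
  dsimp only
  set n := G.length with hn
  set l := PySem.List.enumerate T 0 with hl
  set s0 := initTM l (List.replicate n (none : Option Int), List.replicate n (none : Option Int))
    with hs0
  set idx := initIdx l PySem.Dict.empty with hidx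
  have hK : 0 < T.length := List.length_pos_of_ne_nil hT
  have hio : IdxSpec idx T := initIdx_spec T l PySem.Dict.empty
    (by intro m j h; rw [PySem.Dict.get?_empty] at h; cases h) (enumerate_mem_spec T)
  have hall : ∀ x ∈ l, PySem.Raise.InRange n x.2 := by
    intro x hx
    obtain ⟨jn, _, hlt, hTj⟩ := enumerate_mem_spec T x hx
    exact hTr x.2 (List.mem_of_getElem? hTj)
  have hlchar := initTM_char n l
    (List.replicate n (none : Option Int), List.replicate n (none : Option Int))
    hall (by simp) (by simp)
  have hlen1 : s0.1.length = n := by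
    rw [hs0, (initTM_lengths l _).1]
    simp
  have hlen2 : s0.2.length = n := by
    rw [hs0, (initTM_lengths l _).2]
    simp
  have hg0 : GInv idx n s0 := by
    refine ⟨hlen1, hlen2, ?_, ?_⟩
    · intro p
      rcases hlchar p with ⟨hnone, h1, h2⟩ | ⟨x, hx, hpx, h1, h2⟩
      · rw [h1, h2]
        exact ⟨Iff.rfl, fun m hm => by simp [getD_replicate] at hm⟩
      · rw [h1, h2]
        refine ⟨by simp, fun m hm => ?_⟩
        cases hm
        exact initIdx_isSome l PySem.Dict.empty _ (Or.inl (List.mem_map.mpr ⟨x, hx, rfl⟩))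
    · intro p t hp
      rcases hlchar p with ⟨_, h1, _⟩ | ⟨x, hx, hpx, h1, h2⟩
      · rw [h1, getD_replicate] at hp
        cases hp
      · rw [h1] at hp
        cases hp
        have hc := List.count_le_length (a := (none : Option Int)) (l := s0.1)
        constructor
        · omega
        · rw [hlen1] at hc
          omega
  have hsrc : ∀ u ∈ T, s0.1.getD (pnorm n u) none = some 0 := by
    intro u hu
    have hu' : u ∈ l.map (·.2) := by
      rw [hl, PySem.List.map_snd_enumerate]
      exact hu
    obtain ⟨x, hx, hxu⟩ := List.mem_map.mp hu'
    rcases hlchar (pnorm n u) with ⟨hnone, _, _⟩ | ⟨y, hy, hpy, h1, _⟩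
    · exact absurd (by rw [hxu]) (hnone x hx)
    · rw [h1]
  have hcov : ∀ p q, EdgeOf G p q →
      kltB (kbump (kAt idx s0 p)) (kAt idx s0 q) = true → ∃ u ∈ T, pnorm n u = p := by
    intro p q he himp
    have hpne : s0.1.getD p none ≠ none := by
      intro hnone
      have : kAt idx s0 p = none := kAt_none_iff.mpr hnone
      rw [this] at himp
      simp [kbump, kltB] at himp
    rcases hlchar p with ⟨_, h1, _⟩ | ⟨x, hx, hpx, _, _⟩
    · exact absurd (by rw [h1, getD_replicate]) hpne
    · refine ⟨x.2, ?_, hpx⟩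
      have : x.2 ∈ l.map (·.2) := List.mem_map.mpr ⟨x, hx, rfl⟩
      rwa [hl, PySem.List.map_snd_enumerate] at this
  have hphi0 : phi idx n T.length s0 ≤ n * ((n+1) * T.length) := phi_le_top hg0 hio hK
  have hmm : n * (n+1) * T.length = n * ((n+1) * T.length) := by ring
  obtain ⟨σA, hrunA, hreachA, hgA, hstabA⟩ :=
    aLoop_ok hio hK hG (n*(n+1)*T.length + T.length + 1) s0 T hg0
      (fun u hu => ⟨hTr u hu, by rw [hsrc u hu]; rfl⟩) hcov
      (by simp only [← hn]; omega)
  obtain ⟨σB, hrunB, hreachB, hgB, hstabB⟩ :=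
    bLoop_ok hio hK hG (n*(n+1)*T.length + 1) s0 hg0 (by simp only [← hn]; omega)
  have hkeq := stable_reach_kAt_eq hreachA hreachB hstabA hstabB hlen1 hlen2
  have hmeq : σA.2 = σB.2 := marks_eq hio hgA hgB hkeq
  rw [hrunA, hrunB]
  dsimp only
  rw [hmeq]
  exact count_folds_eq σB.2 (PySem.List.pyGetD T d 0) 0
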